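-- pv_equiv track=rewrite | github.com/hemidactylus/ostracion | ostracion_app/utilities/tools/formatting.py | recursiveReplaceText
-- ===== SOURCE A (Python) =====
-- def recursiveReplaceText(txt, replacees, replacement):
--     """ Apply a chain of replacements (old1, old2...) -> 'new' to a string,
--         where all 'oldN' strings become 'new'.
--     """
--     if len(replacees) == 0:
--         return txt
--     else:
--         return recursiveReplaceText(
--             txt.replace(replacees[0], replacement),
--             replacees[1:],
--             replacement,
--         )
-- ===== SOURCE B (Python) =====
-- def recursiveReplaceText(txt, replacees, replacement):
--     """Iterative rewrite: apply each replacement left to right."""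
--     result = txt
--     for old in replacees:
--         result = result.replace(old, replacement)
--     return result
-- ===== Notes on version B (the rewrite author's own statement) =====
-- stated objective: idiomatic
-- what changed: Replaced A's recursion-with-list-slicing by a plain iterative for-loop accumulating the result; no recursion frames and no per-step slice copies of the replacee list.
import Mathlib
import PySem

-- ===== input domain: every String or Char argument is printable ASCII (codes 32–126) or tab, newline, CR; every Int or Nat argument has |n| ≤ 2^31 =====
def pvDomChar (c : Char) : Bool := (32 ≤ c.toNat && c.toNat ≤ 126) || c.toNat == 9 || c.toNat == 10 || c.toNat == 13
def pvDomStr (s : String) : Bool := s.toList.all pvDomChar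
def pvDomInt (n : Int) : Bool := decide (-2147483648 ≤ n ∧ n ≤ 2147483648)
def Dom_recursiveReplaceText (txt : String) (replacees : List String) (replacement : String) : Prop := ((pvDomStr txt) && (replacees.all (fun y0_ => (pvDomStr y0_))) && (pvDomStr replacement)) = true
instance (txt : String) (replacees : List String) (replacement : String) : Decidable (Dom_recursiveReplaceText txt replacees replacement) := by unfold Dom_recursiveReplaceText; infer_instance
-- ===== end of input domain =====

-- B is the idiomatic iterative loop instead of A's recursion with list slicing; return values agree on all inputs.

-- ===== PORT A =====
-- literal transliteration of A: recursion on replacees, head replacement then recurse on the tail slice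
def recursiveReplaceText (txt : String) (replacees : List String) (replacement : String) : String :=
  if replacees.length = 0 then txt
  else
    recursiveReplaceText
      (PySem.Str.replace txt (replacees.headI) replacement)
      (PySem.List.slice replacees (some 1) none)
      replacement
termination_by replacees.length
decreasing_by
  simp [PySem.List.slice_from_one]
  omega

-- ===== PORT B =====
-- literal transliteration of B: a fold over replacees accumulating the result
def recursiveReplaceText_alt (txt : String) (replacees : List String) (replacement : String) : String :=
  replacees.foldl (fun result old => PySem.Str.replace result old replacement) txt

-- ===== PRECONDITION & SPEC =====
def Spec_recursiveReplaceText (txt : String) (replacees : List String) (replacement : String) (out : String) : Prop := out = recursiveReplaceText_alt txt replacees replacement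
instance (txt : String) (replacees : List String) (replacement : String) (out : String) : Decidable (Spec_recursiveReplaceText txt replacees replacement out) := by unfold Spec_recursiveReplaceText; infer_instance

-- ===== CLAIM (what is proved, stated in full; the proofs are below) =====
def Claim_equal_recursiveReplaceText : Prop := ∀ (txt : String) (replacees : List String) (replacement : String), Dom_recursiveReplaceText txt replacees replacement → Spec_recursiveReplaceText txt replacees replacement (recursiveReplaceText txt replacees replacement)

-- ===== LEMMAS AND PROOFS =====

lemma slice_tail (xs : List String) :
    PySem.List.slice xs (some 1) none = xs.tail :=
  PySem.List.slice_from_one xs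

lemma recRepl_eq_foldl (replacees : List String) (txt replacement : String) :
    recursiveReplaceText txt replacees replacement =
      replacees.foldl (fun result old => PySem.Str.replace result old replacement) txt := by
  induction replacees generalizing txt with
  | nil => simp [recursiveReplaceText]
  | cons x xs ih =>
      rw [recursiveReplaceText]
      simp [slice_tail, ih]

-- ===== VERDICT (by name: the statement is the Claim_ definition above) =====
theorem recursiveReplaceText_spec : Claim_equal_recursiveReplaceText := by
  intro txt replacees replacement _
  unfold Spec_recursiveReplaceText recursiveReplaceText_alt
  exact recRepl_eq_foldl replacees txt replacement
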